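-- pv_equiv track=rewrite | github.com/eiei220101/notam-app | app.py | reorder_airport_sections_for_pdf
-- ===== SOURCE A (Python) =====
-- def reorder_airport_sections_for_pdf(
--     sections: list[tuple[str, list[str]]],
-- ) -> list[tuple[str, list[str]]]:
--     """
--     PDF 出力の空港枠の並び順を固定ルールで並べ替える。
--     優先:
--     - 1ページ目: RJSF（あれば）
--     - 2ページ目: RJSN または RJSS（あれば）。両方あれば RJSN → RJSS
--     - 最後: RJTU / RJAH（最優先で最後）。両方あれば RJTU → RJAH（RJAHが最終）
--     - それ以外: 元の出現順のまま
--     """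
--     if not sections:
--         return sections
--     by_label: dict[str, list[str]] = {}
--     original_order: list[str] = []
--     for label, blocks in sections:
--         if label not in by_label:
--             original_order.append(label)
--         by_label[label] = blocks
--
--     out: list[tuple[str, list[str]]] = []
--
--     def _take(label: str) -> None:
--         if label in by_label:
--             out.append((label, by_label.pop(label)))
--
--     # 強制優先
--     _take("RJSF")
--     _take("RJSN")
--     _take("RJSS")
--
--     # 中間（元の順序を維持）
--     for lb in original_order:
--         if lb in ("RJSF", "RJSN", "RJSS", "RJTU", "RJAH"):
--             continue
--         _take(lb)
--
--     # 最後（最優先で末尾に回す）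
--     _take("RJTU")
--     _take("RJAH")
--
--     # 念のため取りこぼしがあれば最後に（通常ここには来ない）
--     for lb, blocks in by_label.items():
--         out.append((lb, blocks))
--     return out
-- ===== SOURCE B (Python) =====
-- def reorder_airport_sections_for_pdf(
--     sections: list[tuple[str, list[str]]],
-- ) -> list[tuple[str, list[str]]]:
--     prio = {"RJSF": 0, "RJSN": 1, "RJSS": 2, "RJTU": 4, "RJAH": 5}
--     deduped = {label: blocks for label, blocks in sections}
--     return sorted(deduped.items(), key=lambda item: prio.get(item[0], 3))
-- ===== Notes on version B (the rewrite author's own statement) =====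
-- stated objective: simpler
-- what changed: Replaces the explicit dict-popping _take sequence, the skip loop over original_order and the leftover sweep by one dict-comprehension dedup followed by a single stable sort on a 6-level priority key.
import Mathlib
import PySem

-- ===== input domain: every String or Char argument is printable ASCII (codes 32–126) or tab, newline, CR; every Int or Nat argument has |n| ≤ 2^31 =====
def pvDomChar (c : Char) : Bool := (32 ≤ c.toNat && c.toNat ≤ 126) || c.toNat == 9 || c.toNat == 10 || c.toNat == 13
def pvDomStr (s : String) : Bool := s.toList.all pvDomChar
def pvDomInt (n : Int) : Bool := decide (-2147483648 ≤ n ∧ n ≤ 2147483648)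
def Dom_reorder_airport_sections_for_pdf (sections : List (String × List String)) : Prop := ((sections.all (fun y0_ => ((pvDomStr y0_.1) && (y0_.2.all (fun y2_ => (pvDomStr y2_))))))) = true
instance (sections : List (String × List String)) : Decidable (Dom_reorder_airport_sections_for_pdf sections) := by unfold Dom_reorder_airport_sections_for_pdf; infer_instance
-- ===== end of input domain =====

-- B replaces A's explicit dict-popping take sequence by one dict dedup plus a single stable sort
-- on a 6-level priority key (objective: simpler); return values proved equal on every input.

-- ===== PORT A =====
-- Python's nested helper `_take(label)` acting on the (by_label, out) state.
def pvTake (st : PySem.Dict String (List String) × List (String × List String)) (label : String) :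
    PySem.Dict String (List String) × List (String × List String) :=
  match st.1.get? label with
  | some v => (st.1.erase label, st.2 ++ [(label, v)])
  | none => st

def reorder_airport_sections_for_pdf (sections : List (String × List String)) :
    List (String × List String) :=
  if sections = [] then sections
  else
    -- for label, blocks in sections: if label not in by_label: original_order.append(label); by_label[label] = blocks
    let bo := sections.foldl
      (fun (acc : PySem.Dict String (List String) × List String) p =>
        (acc.1.insert p.1 p.2,
         if acc.1.contains p.1 then acc.2 else acc.2 ++ [p.1]))
      (PySem.Dict.empty, [])
    let st0 : PySem.Dict String (List String) × List (String × List String) := (bo.1, [])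
    let st1 := pvTake (pvTake (pvTake st0 "RJSF") "RJSN") "RJSS"
    let st2 := bo.2.foldl
      (fun st lb =>
        if lb ∈ (["RJSF", "RJSN", "RJSS", "RJTU", "RJAH"] : List String) then st
        else pvTake st lb) st1
    let st3 := pvTake (pvTake st2 "RJTU") "RJAH"
    st3.2 ++ st3.1.items

-- ===== PORT B =====
-- prio = {"RJSF": 0, "RJSN": 1, "RJSS": 2, "RJTU": 4, "RJAH": 5}
def pvPrio : PySem.Dict String Int :=
  PySem.Dict.ofList [("RJSF", 0), ("RJSN", 1), ("RJSS", 2), ("RJTU", 4), ("RJAH", 5)]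

def reorder_airport_sections_for_pdf_alt (sections : List (String × List String)) :
    List (String × List String) :=
  let deduped := sections.foldl (fun d p => d.insert p.1 p.2) PySem.Dict.empty
  PySem.List.sorted deduped.items (fun item => pvPrio.getD item.1 3) false

-- ===== PRECONDITION & SPEC =====
def Spec_reorder_airport_sections_for_pdf (sections : List (String × List String)) (out : List (String × List String)) : Prop := out = reorder_airport_sections_for_pdf_alt sections
instance (sections : List (String × List String)) (out : List (String × List String)) : Decidable (Spec_reorder_airport_sections_for_pdf sections out) := by unfold Spec_reorder_airport_sections_for_pdf; infer_instance

-- ===== CLAIM (what is proved, stated in full; the proofs are below) =====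
def Claim_equal_reorder_airport_sections_for_pdf : Prop := ∀ (sections : List (String × List String)), Dom_reorder_airport_sections_for_pdf sections → Spec_reorder_airport_sections_for_pdf sections (reorder_airport_sections_for_pdf sections)

-- ===== LEMMAS AND PROOFS =====

-- closed form of pvPrio.getD · 3
def pkey (lb : String) : Int :=
  if lb = "RJSF" then 0 else if lb = "RJSN" then 1 else if lb = "RJSS" then 2
  else if lb = "RJTU" then 4 else if lb = "RJAH" then 5 else 3

theorem pk_eq (lb : String) : pvPrio.getD lb 3 = pkey lb := by
  have h : pvPrio = PySem.Dict.mk [("RJSF", 0), ("RJSN", 1), ("RJSS", 2), ("RJTU", 4), ("RJAH", 5)] := by decide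
  rw [h, pkey]
  by_cases h1 : lb = "RJSF"
  · subst h1; decide
  by_cases h2 : lb = "RJSN"
  · subst h2; decide
  by_cases h3 : lb = "RJSS"
  · subst h3; decide
  by_cases h4 : lb = "RJTU"
  · subst h4; decide
  by_cases h5 : lb = "RJAH"
  · subst h5; decide
  simp [PySem.Dict.getD, PySem.Dict.get?, Ne.symm h1, Ne.symm h2, Ne.symm h3, Ne.symm h4,
    Ne.symm h5, h1, h2, h3, h4, h5]


theorem pkey_bkt0 (s : String) : (pkey s == 0) = (s == "RJSF") := by
  unfold pkey; split_ifs <;> simp_all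
theorem pkey_bkt1 (s : String) : (pkey s == 1) = (s == "RJSN") := by
  unfold pkey; split_ifs <;> simp_all
theorem pkey_bkt2 (s : String) : (pkey s == 2) = (s == "RJSS") := by
  unfold pkey; split_ifs <;> simp_all
theorem pkey_bkt4 (s : String) : (pkey s == 4) = (s == "RJTU") := by
  unfold pkey; split_ifs <;> simp_all
theorem pkey_bkt5 (s : String) : (pkey s == 5) = (s == "RJAH") := by
  unfold pkey; split_ifs <;> simp_all
theorem pkey_bkt3 (s : String) :
    (pkey s == 3) = !(decide (s ∈ (["RJSF", "RJSN", "RJSS", "RJTU", "RJAH"] : List String))) := by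
  unfold pkey; split_ifs <;> simp_all

-- erasing one key leaves every other key's bucket unchanged
theorem filter_key_drop {ν : Type} (l : List (String × ν)) (s t : String) (hts : t ≠ s) :
    (l.filter (fun p => !(p.1 == s))).filter (fun p => p.1 == t) = l.filter (fun p => p.1 == t) := by
  rw [List.filter_filter]
  apply List.filter_congr
  intro p _
  by_cases hp : p.1 = t
  · simp [hp, hts]
  · simp [hp]

-- stable insertion: x lands after every element it is not `before`, before the first one it is
theorem insertBy_middle {α : Type} (before : α → α → Bool) (x : α) (l1 l2 : List α)
    (h1 : ∀ y ∈ l1, before x y = false) (h2 : ∀ y ∈ l2, before x y = true) :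
    PySem.List.insertBy before x (l1 ++ l2) = l1 ++ x :: l2 := by
  induction l1 with
  | nil =>
    cases l2 with
    | nil => rfl
    | cons y ys => simp [PySem.List.insertBy, h2 y (by simp)]
  | cons a t ih =>
    have ha : before x a = false := h1 a (by simp)
    simp [PySem.List.insertBy, ha]
    exact ih (fun y hy => h1 y (by simp [hy]))

theorem bucket_step {α : Type} (key : α → Int) (x : α) (B : Int → List α)
    (hB : ∀ (i : Int), ∀ y ∈ B i, key y = i) (hx0 : 0 ≤ key x) (hx5 : key x ≤ 5) :
    PySem.List.insertBy (fun a b => decide (key a < key b)) x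
        (B 0 ++ B 1 ++ B 2 ++ B 3 ++ B 4 ++ B 5) =
      (B 0 ++ (if key x = 0 then [x] else [])) ++ (B 1 ++ (if key x = 1 then [x] else [])) ++
      (B 2 ++ (if key x = 2 then [x] else [])) ++ (B 3 ++ (if key x = 3 then [x] else [])) ++
      (B 4 ++ (if key x = 4 then [x] else [])) ++ (B 5 ++ (if key x = 5 then [x] else [])) := by
  have hk : key x = 0 ∨ key x = 1 ∨ key x = 2 ∨ key x = 3 ∨ key x = 4 ∨ key x = 5 := by omega
  rcases hk with hx | hx | hx | hx | hx | hx
  · rw [show B 0 ++ B 1 ++ B 2 ++ B 3 ++ B 4 ++ B 5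
        = B 0 ++ (B 1 ++ (B 2 ++ (B 3 ++ (B 4 ++ B 5)))) from by simp [List.append_assoc]]
    rw [insertBy_middle _ x _ _
        (by intro y hy; simp [hB _ _ hy, hx])
        (by intro y hy
            simp only [List.mem_append] at hy
            rcases hy with hy | hy | hy | hy | hy <;> simp [hB _ _ hy, hx])]
    simp [hx, List.append_assoc]
  · rw [show B 0 ++ B 1 ++ B 2 ++ B 3 ++ B 4 ++ B 5
        = (B 0 ++ B 1) ++ (B 2 ++ (B 3 ++ (B 4 ++ B 5))) from by simp [List.append_assoc]]
    rw [insertBy_middle _ x _ _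
        (by intro y hy
            simp only [List.mem_append] at hy
            rcases hy with hy | hy <;> simp [hB _ _ hy, hx])
        (by intro y hy
            simp only [List.mem_append] at hy
            rcases hy with hy | hy | hy | hy <;> simp [hB _ _ hy, hx])]
    simp [hx, List.append_assoc]
  · rw [show B 0 ++ B 1 ++ B 2 ++ B 3 ++ B 4 ++ B 5
        = (B 0 ++ B 1 ++ B 2) ++ (B 3 ++ (B 4 ++ B 5)) from by simp [List.append_assoc]]
    rw [insertBy_middle _ x _ _
        (by intro y hy
            simp only [List.mem_append] at hy
            rcases hy with (hy | hy) | hy <;> simp [hB _ _ hy, hx])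
        (by intro y hy
            simp only [List.mem_append] at hy
            rcases hy with hy | hy | hy <;> simp [hB _ _ hy, hx])]
    simp [hx, List.append_assoc]
  · rw [show B 0 ++ B 1 ++ B 2 ++ B 3 ++ B 4 ++ B 5
        = (B 0 ++ B 1 ++ B 2 ++ B 3) ++ (B 4 ++ B 5) from by simp [List.append_assoc]]
    rw [insertBy_middle _ x _ _
        (by intro y hy
            simp only [List.mem_append] at hy
            rcases hy with ((hy | hy) | hy) | hy <;> simp [hB _ _ hy, hx])
        (by intro y hy
            simp only [List.mem_append] at hy
            rcases hy with hy | hy <;> simp [hB _ _ hy, hx])]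
    simp [hx, List.append_assoc]
  · rw [show B 0 ++ B 1 ++ B 2 ++ B 3 ++ B 4 ++ B 5
        = (B 0 ++ B 1 ++ B 2 ++ B 3 ++ B 4) ++ B 5 from by simp [List.append_assoc]]
    rw [insertBy_middle _ x _ _
        (by intro y hy
            simp only [List.mem_append] at hy
            rcases hy with (((hy | hy) | hy) | hy) | hy <;> simp [hB _ _ hy, hx])
        (by intro y hy; simp [hB _ _ hy, hx])]
    simp [hx, List.append_assoc]
  · rw [show B 0 ++ B 1 ++ B 2 ++ B 3 ++ B 4 ++ B 5
        = (B 0 ++ B 1 ++ B 2 ++ B 3 ++ B 4 ++ B 5) ++ ([] : List α) from by simp]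
    rw [insertBy_middle _ x _ _
        (by intro y hy
            simp only [List.mem_append] at hy
            rcases hy with ((((hy | hy) | hy) | hy) | hy) | hy <;> simp [hB _ _ hy, hx])
        (by simp)]
    simp [hx, List.append_assoc]

-- a stable sort whose keys all lie in {0,…,5} is the concatenation of its six key buckets
theorem sorted_buckets {α : Type} (key : α → Int) (xs : List α)
    (hb : ∀ x ∈ xs, 0 ≤ key x ∧ key x ≤ 5) :
    PySem.List.sorted xs key false =
      xs.filter (fun a => key a == 0) ++ xs.filter (fun a => key a == 1) ++
      xs.filter (fun a => key a == 2) ++ xs.filter (fun a => key a == 3) ++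
      xs.filter (fun a => key a == 4) ++ xs.filter (fun a => key a == 5) := by
  rw [PySem.List.sorted_eq_foldl_insertBy]
  induction xs using List.reverseRecOn with
  | nil => rfl
  | append_singleton xs x ih =>
    have ihx := ih (fun y hy => hb y (by simp [hy]))
    rw [List.foldl_append, List.foldl_cons, List.foldl_nil, ihx]
    obtain ⟨h0, h5⟩ := hb x (by simp)
    rw [bucket_step key x (fun i => xs.filter (fun a => key a == i))
        (by intro i y hy; simpa using (List.mem_filter.mp hy).2) h0 h5]
    simp [List.filter_append, List.filter_cons]

-- A's build loop: the order list is exactly the dict's key list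
theorem buildA (sections : List (String × List String)) (d : PySem.Dict String (List String)) :
    sections.foldl
      (fun (acc : PySem.Dict String (List String) × List String) p =>
        (acc.1.insert p.1 p.2,
         if acc.1.contains p.1 then acc.2 else acc.2 ++ [p.1]))
      (d, d.keys)
    = (sections.foldl (fun d p => d.insert p.1 p.2) d,
       (sections.foldl (fun d p => d.insert p.1 p.2) d).keys) := by
  induction sections generalizing d with
  | nil => rfl
  | cons p t ih =>
    simp only [List.foldl_cons]
    have : (if d.contains p.1 then d.keys else d.keys ++ [p.1]) = (d.insert p.1 p.2).keys := by
      by_cases h : d.contains p.1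
      · simp [h, PySem.Dict.keys_insert_of_contains _ p.2 h]
      · simp only [h]
        simp [PySem.Dict.keys_insert_of_not_contains _ p.2 (by simpa using h)]
    rw [this]
    exact ih _

theorem find?_filter_of_imp {α : Type} (l : List α) (p q : α → Bool)
    (h : ∀ a, p a = true → q a = true) : (l.filter q).find? p = l.find? p := by
  induction l with
  | nil => rfl
  | cons a t ih =>
    by_cases hq : q a
    · by_cases hp : p a
      · simp [hq, hp]
      · simp [hq, hp, ih]
    · have hp : p a = false := by
        by_contra hc
        exact hq (h a (by simpa using hc))
      simp [hq, hp, ih]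

theorem nodup_filter_keys {ν : Type} (l : List (String × ν)) (q : String × ν → Bool)
    (hn : (l.map Prod.fst).Nodup) : ((l.filter q).map Prod.fst).Nodup :=
  hn.sublist ((l.filter_sublist).map Prod.fst)

theorem filter_key_of_find? {ν : Type} (l : List (String × ν)) (s : String) (q : String × ν)
    (hn : (l.map Prod.fst).Nodup) (hf : l.find? (fun p => p.1 == s) = some q) :
    l.filter (fun p => p.1 == s) = [q] := by
  induction l with
  | nil => simp at hf
  | cons a t ih =>
    have hn' : (a.1 :: t.map Prod.fst).Nodup := by simpa using hn
    rcases List.nodup_cons.mp hn' with ⟨ha1, ht⟩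
    by_cases hs : a.1 = s
    · have hfa : List.find? (fun p => p.1 == s) (a :: t) = some a := by
        simp [hs]
      rw [hf] at hfa
      have hq : q = a := by simpa using hfa
      subst hq
      have htf : t.filter (fun p => p.1 == s) = [] := by
        rw [List.filter_eq_nil_iff]
        intro b hb
        simp only [beq_iff_eq]
        intro hbs
        have hbm : b.1 ∈ t.map Prod.fst := List.mem_map_of_mem hb
        exact ha1 ((hs.trans hbs.symm) ▸ hbm)
      simp [hs, htf]
    · have hfa : List.find? (fun p => p.1 == s) (a :: t) = t.find? (fun p => p.1 == s) := by
        simp [hs]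
      rw [hfa] at hf
      simp [hs, ih ht hf]

theorem filter_key_of_find?_none {ν : Type} (l : List (String × ν)) (s : String)
    (hf : l.find? (fun p => p.1 == s) = none) :
    l.filter (fun p => p.1 == s) = [] := by
  rw [List.filter_eq_nil_iff]
  intro b hb
  simpa using List.find?_eq_none.mp hf b hb

theorem pvTake_mk (l : List (String × List String)) (out : List (String × List String))
    (s : String) (hn : (l.map Prod.fst).Nodup) :
    pvTake (PySem.Dict.mk l, out) s
      = (PySem.Dict.mk (l.filter (fun p => !(p.1 == s))),
         out ++ l.filter (fun p => p.1 == s)) := by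
  unfold pvTake
  cases hf : l.find? (fun p => p.1 == s) with
  | none =>
    have hg : (PySem.Dict.mk l).get? s = none := by simp [PySem.Dict.get?, hf]
    have h2 : l.filter (fun p => !(p.1 == s)) = l := by
      rw [List.filter_eq_self]
      intro b hb
      simpa using List.find?_eq_none.mp hf b hb
    simp [hg, h2, filter_key_of_find?_none l s hf]
  | some q =>
    have hq1 : q.1 = s := by simpa using List.find?_some hf
    subst hq1
    have hg : (PySem.Dict.mk l).get? q.1 = some q.2 := by simp [PySem.Dict.get?, hf]
    have hfk : l.filter (fun p => p.1 == q.1) = [q] := filter_key_of_find? l q.1 q hn hf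
    simp [hg, PySem.Dict.erase, hfk]

theorem mid_fold (ks : List String) :
    ∀ (cur : List (String × List String)) (out : List (String × List String)),
    (cur.map Prod.fst).Nodup → ks.Nodup →
    ks.foldl
      (fun st lb =>
        if lb ∈ (["RJSF", "RJSN", "RJSS", "RJTU", "RJAH"] : List String) then st
        else pvTake st lb) (PySem.Dict.mk cur, out)
    = (PySem.Dict.mk (cur.filter (fun p =>
          decide (p.1 ∈ (["RJSF", "RJSN", "RJSS", "RJTU", "RJAH"] : List String))
          || !(decide (p.1 ∈ ks)))),
       out ++ ks.filterMap (fun k =>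
          if k ∈ (["RJSF", "RJSN", "RJSS", "RJTU", "RJAH"] : List String) then none
          else cur.find? (fun p => p.1 == k))) := by
  induction ks with
  | nil => intro cur out hn _; simp
  | cons k ks ih =>
    intro cur out hn hks
    rcases List.nodup_cons.mp hks with ⟨hk1, hks'⟩
    by_cases hk5 : k ∈ (["RJSF", "RJSN", "RJSS", "RJTU", "RJAH"] : List String)
    · have hfil : cur.filter (fun p =>
            decide (p.1 ∈ (["RJSF", "RJSN", "RJSS", "RJTU", "RJAH"] : List String))
            || !(decide (p.1 ∈ ks)))
          = cur.filter (fun p =>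
            decide (p.1 ∈ (["RJSF", "RJSN", "RJSS", "RJTU", "RJAH"] : List String))
            || !(decide (p.1 ∈ k :: ks))) := by
        apply List.filter_congr
        intro p _
        by_cases hpk : p.1 = k
        · simp [hpk, hk5]
        · simp [List.mem_cons, hpk]
      rw [List.foldl_cons, if_pos hk5, ih cur out hn hks', hfil, List.filterMap_cons, if_pos hk5]
    · rw [List.foldl_cons, if_neg hk5]
      cases hf : cur.find? (fun p => p.1 == k) with
      | none =>
        have hstep : pvTake (PySem.Dict.mk cur, out) k = (PySem.Dict.mk cur, out) := by
          unfold pvTake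
          simp [PySem.Dict.get?, hf]
        have hnk : ∀ p ∈ cur, p.1 ≠ k := by
          intro p hp
          simpa using List.find?_eq_none.mp hf p hp
        have hfil : cur.filter (fun p =>
              decide (p.1 ∈ (["RJSF", "RJSN", "RJSS", "RJTU", "RJAH"] : List String))
              || !(decide (p.1 ∈ ks)))
            = cur.filter (fun p =>
              decide (p.1 ∈ (["RJSF", "RJSN", "RJSS", "RJTU", "RJAH"] : List String))
              || !(decide (p.1 ∈ k :: ks))) := by
          apply List.filter_congr
          intro p hp
          simp [List.mem_cons, hnk p hp]
        rw [hstep, ih cur out hn hks', hfil, List.filterMap_cons, if_neg hk5, hf]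
      | some q =>
        have hq1 : q.1 = k := by simpa using List.find?_some hf
        have hstep : pvTake (PySem.Dict.mk cur, out) k
            = (PySem.Dict.mk (cur.filter (fun p => !(p.1 == k))), out ++ [q]) := by
          have hg : (PySem.Dict.mk cur).get? k = some q.2 := by simp [PySem.Dict.get?, hf]
          unfold pvTake
          rw [hg]
          simp [PySem.Dict.erase, ← hq1]
        have hdict : (cur.filter (fun p => !(p.1 == k))).filter (fun p =>
              decide (p.1 ∈ (["RJSF", "RJSN", "RJSS", "RJTU", "RJAH"] : List String))
              || !(decide (p.1 ∈ ks)))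
            = cur.filter (fun p =>
              decide (p.1 ∈ (["RJSF", "RJSN", "RJSS", "RJTU", "RJAH"] : List String))
              || !(decide (p.1 ∈ k :: ks))) := by
          rw [List.filter_filter]
          apply List.filter_congr
          intro p _
          by_cases hpk : p.1 = k
          · simp [hpk, hk5]
          · simp [List.mem_cons, hpk]
        have hcongr : ks.filterMap (fun k' =>
              if k' ∈ (["RJSF", "RJSN", "RJSS", "RJTU", "RJAH"] : List String) then none
              else (cur.filter (fun p => !(p.1 == k))).find? (fun p => p.1 == k'))
            = ks.filterMap (fun k' =>
              if k' ∈ (["RJSF", "RJSN", "RJSS", "RJTU", "RJAH"] : List String) then none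
              else cur.find? (fun p => p.1 == k')) := by
          apply List.filterMap_congr
          intro k' hk'
          by_cases h5 : k' ∈ (["RJSF", "RJSN", "RJSS", "RJTU", "RJAH"] : List String)
          · simp [h5]
          · have hne : k' ≠ k := fun hc => hk1 (hc ▸ hk')
            rw [if_neg h5, if_neg h5]
            apply find?_filter_of_imp
            intro a ha
            simp only [beq_iff_eq] at ha
            simp [ha, hne]
        rw [hstep, ih _ _ (nodup_filter_keys cur _ hn) hks', hdict, hcongr,
          List.filterMap_cons, if_neg hk5, hf]
        simp [List.append_assoc]

theorem filterMap_keys {ν : Type} (l : List (String × ν)) (hn : (l.map Prod.fst).Nodup) :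
    (l.map Prod.fst).filterMap (fun k =>
        if k ∈ (["RJSF", "RJSN", "RJSS", "RJTU", "RJAH"] : List String) then none
        else l.find? (fun p => p.1 == k))
      = l.filter (fun p => !(decide (p.1 ∈ (["RJSF", "RJSN", "RJSS", "RJTU", "RJAH"] : List String)))) := by
  induction l with
  | nil => rfl
  | cons a t ih =>
    have hn' : (a.1 :: t.map Prod.fst).Nodup := by simpa using hn
    rcases List.nodup_cons.mp hn' with ⟨ha1, ht⟩
    have htail : (t.map Prod.fst).filterMap (fun k =>
          if k ∈ (["RJSF", "RJSN", "RJSS", "RJTU", "RJAH"] : List String) then none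
          else (a :: t).find? (fun p => p.1 == k))
        = (t.map Prod.fst).filterMap (fun k =>
          if k ∈ (["RJSF", "RJSN", "RJSS", "RJTU", "RJAH"] : List String) then none
          else t.find? (fun p => p.1 == k)) := by
      apply List.filterMap_congr
      intro k hk
      have hne : ¬(a.1 == k) = true := by
        simp only [beq_iff_eq]
        exact fun hc => ha1 (hc ▸ hk)
      by_cases h5 : k ∈ (["RJSF", "RJSN", "RJSS", "RJTU", "RJAH"] : List String)
      · rw [if_pos h5, if_pos h5]
      · rw [if_neg h5, if_neg h5]
        exact List.find?_cons_of_neg hne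
    by_cases h5 : a.1 ∈ (["RJSF", "RJSN", "RJSS", "RJTU", "RJAH"] : List String)
    · rw [List.map_cons, List.filterMap_cons, if_pos h5, htail, ih ht,
        List.filter_cons_of_neg (by simp [h5])]
    · have hfa : (a :: t).find? (fun p => p.1 == a.1) = some a :=
        List.find?_cons_of_pos (by simp)
      rw [List.map_cons, List.filterMap_cons, if_neg h5, hfa, htail, ih ht,
        List.filter_cons_of_pos (by simp [h5])]

-- the whole take phase of A, on an item list with unique keys
theorem A_else (l : List (String × List String)) (hn : (l.map Prod.fst).Nodup) :
    (let st0 : PySem.Dict String (List String) × List (String × List String) :=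
        (PySem.Dict.mk l, [])
     let st1 := pvTake (pvTake (pvTake st0 "RJSF") "RJSN") "RJSS"
     let st2 := (l.map Prod.fst).foldl
       (fun st lb =>
         if lb ∈ (["RJSF", "RJSN", "RJSS", "RJTU", "RJAH"] : List String) then st
         else pvTake st lb) st1
     let st3 := pvTake (pvTake st2 "RJTU") "RJAH"
     st3.2 ++ st3.1.items)
    = l.filter (fun p => p.1 == "RJSF") ++ l.filter (fun p => p.1 == "RJSN") ++
      l.filter (fun p => p.1 == "RJSS") ++
      l.filter (fun p => !(decide (p.1 ∈ (["RJSF", "RJSN", "RJSS", "RJTU", "RJAH"] : List String)))) ++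
      l.filter (fun p => p.1 == "RJTU") ++ l.filter (fun p => p.1 == "RJAH") := by
  simp only []
  have hnF := nodup_filter_keys l (fun p => !(p.1 == "RJSF")) hn
  have hnFN := nodup_filter_keys _ (fun p => !(p.1 == "RJSN")) hnF
  have hnFNS := nodup_filter_keys _ (fun p => !(p.1 == "RJSS")) hnFN
  rw [pvTake_mk l [] "RJSF" hn, pvTake_mk _ _ "RJSN" hnF, pvTake_mk _ _ "RJSS" hnFN,
    mid_fold (l.map Prod.fst) _ _ hnFNS hn]
  -- collapse the three take buckets to buckets of l
  rw [filter_key_drop l "RJSF" "RJSN" (by decide),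
    filter_key_drop _ "RJSN" "RJSS" (by decide), filter_key_drop l "RJSF" "RJSS" (by decide)]
  -- the middle loop output is the non-special bucket of l
  have hmid : (l.map Prod.fst).filterMap (fun k =>
        if k ∈ (["RJSF", "RJSN", "RJSS", "RJTU", "RJAH"] : List String) then none
        else (((l.filter (fun p => !(p.1 == "RJSF"))).filter
          (fun p => !(p.1 == "RJSN"))).filter (fun p => !(p.1 == "RJSS"))).find?
            (fun p => p.1 == k))
      = l.filter (fun p => !(decide (p.1 ∈ (["RJSF", "RJSN", "RJSS", "RJTU", "RJAH"] : List String)))) := by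
    rw [List.filterMap_congr (g := fun k =>
        if k ∈ (["RJSF", "RJSN", "RJSS", "RJTU", "RJAH"] : List String) then none
        else l.find? (fun p => p.1 == k)) ?_, filterMap_keys l hn]
    intro k hk
    simp only []
    by_cases h5 : k ∈ (["RJSF", "RJSN", "RJSS", "RJTU", "RJAH"] : List String)
    · rw [if_pos h5, if_pos h5]
    · have hne : k ≠ "RJSF" ∧ k ≠ "RJSN" ∧ k ≠ "RJSS" := by
        refine ⟨?_, ?_, ?_⟩ <;> intro hc <;> exact h5 (by simp [hc])
      rw [if_neg h5, if_neg h5]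
      rw [find?_filter_of_imp _ _ _ (fun a ha => by
        simp only [beq_iff_eq] at ha; simp [ha, hne.2.2])]
      rw [find?_filter_of_imp _ _ _ (fun a ha => by
        simp only [beq_iff_eq] at ha; simp [ha, hne.2.1])]
      rw [find?_filter_of_imp _ _ _ (fun a ha => by
        simp only [beq_iff_eq] at ha; simp [ha, hne.1])]
  rw [hmid]
  -- the dict left after the middle loop holds exactly the RJTU/RJAH entries of l
  have hd2 : (((l.filter (fun p => !(p.1 == "RJSF"))).filter
        (fun p => !(p.1 == "RJSN"))).filter (fun p => !(p.1 == "RJSS"))).filter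
        (fun p => decide (p.1 ∈ (["RJSF", "RJSN", "RJSS", "RJTU", "RJAH"] : List String))
          || !(decide (p.1 ∈ l.map Prod.fst)))
      = l.filter (fun p => p.1 == "RJTU" || p.1 == "RJAH") := by
    rw [List.filter_filter, List.filter_filter, List.filter_filter]
    apply List.filter_congr
    intro p hp
    have hm : p.1 ∈ l.map Prod.fst := List.mem_map_of_mem hp
    by_cases hF : p.1 = "RJSF" <;> by_cases hN : p.1 = "RJSN" <;> by_cases hS : p.1 = "RJSS" <;>
      by_cases hT : p.1 = "RJTU" <;> by_cases hA : p.1 = "RJAH" <;> simp_all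
  rw [hd2]
  have hnTA := nodup_filter_keys l (fun p => p.1 == "RJTU" || p.1 == "RJAH") hn
  rw [pvTake_mk _ _ "RJTU" hnTA]
  have hT : (l.filter (fun p => p.1 == "RJTU" || p.1 == "RJAH")).filter
      (fun p => p.1 == "RJTU") = l.filter (fun p => p.1 == "RJTU") := by
    rw [List.filter_filter]
    apply List.filter_congr
    intro p _
    by_cases hp : p.1 = "RJTU" <;> simp [hp]
  have hTA2A : (l.filter (fun p => p.1 == "RJTU" || p.1 == "RJAH")).filter
      (fun p => !(p.1 == "RJTU")) = l.filter (fun p => p.1 == "RJAH") := by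
    rw [List.filter_filter]
    apply List.filter_congr
    intro p _
    by_cases hT : p.1 = "RJTU"
    · simp [hT]
    · have hb : (p.1 == "RJTU") = false := by simpa using hT
      rw [hb]
      simp
  rw [hT, hTA2A]
  have hnA := nodup_filter_keys l (fun p => p.1 == "RJAH") hn
  rw [pvTake_mk _ _ "RJAH" hnA]
  have hA : (l.filter (fun p => p.1 == "RJAH")).filter (fun p => p.1 == "RJAH")
      = l.filter (fun p => p.1 == "RJAH") := by
    rw [List.filter_filter]
    apply List.filter_congr
    intro p _
    by_cases hp : p.1 = "RJAH" <;> simp [hp]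
  have hAnil : (l.filter (fun p => p.1 == "RJAH")).filter (fun p => !(p.1 == "RJAH"))
      = [] := by
    rw [List.filter_filter, List.filter_eq_nil_iff]
    intro p _
    by_cases hp : p.1 = "RJAH" <;> simp [hp]
  rw [hA, hAnil]
  simp [List.append_assoc]

-- B's sorted call, via the six buckets of pkey
theorem B_val (l : List (String × List String)) :
    PySem.List.sorted l (fun item => pvPrio.getD item.1 3) false
    = l.filter (fun p => p.1 == "RJSF") ++ l.filter (fun p => p.1 == "RJSN") ++
      l.filter (fun p => p.1 == "RJSS") ++
      l.filter (fun p => !(decide (p.1 ∈ (["RJSF", "RJSN", "RJSS", "RJTU", "RJAH"] : List String)))) ++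
      l.filter (fun p => p.1 == "RJTU") ++ l.filter (fun p => p.1 == "RJAH") := by
  have hkf : (fun item : String × List String => pvPrio.getD item.1 3)
      = (fun item : String × List String => pkey item.1) := funext fun t => pk_eq t.1
  rw [hkf, sorted_buckets (fun item => pkey item.1) l
      (by intro x _; simp only [pkey]; split_ifs <;> omega)]
  rw [show (fun a : String × List String => pkey a.1 == 0) = fun p => p.1 == "RJSF" from
      funext fun p => pkey_bkt0 p.1,
    show (fun a : String × List String => pkey a.1 == 1) = fun p => p.1 == "RJSN" from
      funext fun p => pkey_bkt1 p.1,
    show (fun a : String × List String => pkey a.1 == 2) = fun p => p.1 == "RJSS" from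
      funext fun p => pkey_bkt2 p.1,
    show (fun a : String × List String => pkey a.1 == 3)
        = fun p : String × List String =>
          !(decide (p.1 ∈ (["RJSF", "RJSN", "RJSS", "RJTU", "RJAH"] : List String))) from
      funext fun p => pkey_bkt3 p.1,
    show (fun a : String × List String => pkey a.1 == 4) = fun p => p.1 == "RJTU" from
      funext fun p => pkey_bkt4 p.1,
    show (fun a : String × List String => pkey a.1 == 5) = fun p => p.1 == "RJAH" from
      funext fun p => pkey_bkt5 p.1]

-- ===== VERDICT (by name: the statement is the Claim_ definition above) =====
theorem reorder_airport_sections_for_pdf_spec : Claim_equal_reorder_airport_sections_for_pdf := by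
  intro sections _
  unfold Spec_reorder_airport_sections_for_pdf
  by_cases hs : sections = []
  · subst hs; rfl
  · unfold reorder_airport_sections_for_pdf reorder_airport_sections_for_pdf_alt
    rw [if_neg hs]
    have hbuild := buildA sections PySem.Dict.empty
    have hnd : ((sections.foldl (fun d p => d.insert p.1 p.2)
        (PySem.Dict.empty : PySem.Dict String (List String))).keys).Nodup :=
      PySem.Dict.nodup_keys_foldl_insert_key sections Prod.fst (fun _ p => p.2)
        PySem.Dict.empty (by decide)
    simp only []
    rw [show ((PySem.Dict.empty : PySem.Dict String (List String)), ([] : List String))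
        = ((PySem.Dict.empty : PySem.Dict String (List String)),
           (PySem.Dict.empty : PySem.Dict String (List String)).keys) from rfl, hbuild]
    generalize hbd : sections.foldl (fun d p => d.insert p.1 p.2)
        (PySem.Dict.empty : PySem.Dict String (List String)) = bd at hnd ⊢
    obtain ⟨l⟩ := bd
    have hn : (l.map Prod.fst).Nodup := hnd
    exact (A_else l hn).trans (B_val l).symm
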